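-- pv_equiv track=rewrite | github.com/DyeonPark/CodingTest | Programmers/음양 더하기.py | solution
-- ===== SOURCE A (Python) =====
-- def solution(absolutes, signs):
--
--     answer = 0
--
--     for idx in range(len(absolutes)):
--         if signs[idx] == True:
--             answer += absolutes[idx]
--         else:
--             answer -= absolutes[idx]
--
--     return answer
-- ===== SOURCE B (Python) =====
-- def solution(absolutes, signs):
--     neg = sum(a for a, s in zip(absolutes, signs) if s != True)
--     return sum(absolutes) - 2 * neg
-- ===== Notes on version B (the rewrite author's own statement) =====
-- stated objective: alternative
-- what changed: Replaces the index loop with a signed accumulator by a total-sum-minus-twice-negatives formulation over zip(absolutes, signs), with no indexing at all.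
-- outside the precondition, e.g. on solution([1, 2], [True]): A raises IndexError, B returns 3
import Mathlib
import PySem

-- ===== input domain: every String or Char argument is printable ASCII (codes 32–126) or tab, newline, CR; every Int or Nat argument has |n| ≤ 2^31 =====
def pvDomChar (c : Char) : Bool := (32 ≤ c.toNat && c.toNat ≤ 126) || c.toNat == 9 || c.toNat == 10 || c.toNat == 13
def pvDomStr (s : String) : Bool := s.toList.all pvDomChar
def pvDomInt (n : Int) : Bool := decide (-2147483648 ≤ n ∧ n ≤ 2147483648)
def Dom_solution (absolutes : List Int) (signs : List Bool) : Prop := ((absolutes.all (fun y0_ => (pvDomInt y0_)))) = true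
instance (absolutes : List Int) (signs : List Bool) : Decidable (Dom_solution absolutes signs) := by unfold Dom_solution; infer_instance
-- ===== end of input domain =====

-- ===== PORT A =====
-- literal port of A: for idx in range(len(absolutes)): signed accumulation by signs[idx]
-- (signs[idx] is in range on every input admitted by Pre_solution, so pyGetD is exact there)
def solution (absolutes : List Int) (signs : List Bool) : Int :=
  (PySem.List.pyRange 0 (absolutes.length : Int) 1).foldl
    (fun answer idx =>
      if PySem.List.pyGetD signs idx false == true then
        answer + PySem.List.pyGetD absolutes idx 0
      else
        answer - PySem.List.pyGetD absolutes idx 0) 0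

-- ===== PORT B =====
-- port of Source B: neg = sum(a for a, s in zip(absolutes, signs) if s != True); sum(absolutes) - 2*neg
def solution_alt (absolutes : List Int) (signs : List Bool) : Int :=
  let neg := (((absolutes.zip signs).filter (fun p => p.2 != true)).map Prod.fst).sum
  absolutes.sum - 2 * neg

-- ===== PRECONDITION & SPEC =====
-- Pre_ excludes exactly the inputs where A raises IndexError: signs shorter than absolutes.
def Pre_solution (absolutes : List Int) (signs : List Bool) : Prop :=
  absolutes.length ≤ signs.length
instance (absolutes : List Int) (signs : List Bool) : Decidable (Pre_solution absolutes signs) := by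
  unfold Pre_solution; infer_instance
def pvWitness_solution : List Int × List Bool := ([3, 5], [true, false])

def Spec_solution (absolutes : List Int) (signs : List Bool) (out : Int) : Prop := out = solution_alt absolutes signs
instance (absolutes : List Int) (signs : List Bool) (out : Int) : Decidable (Spec_solution absolutes signs out) := by unfold Spec_solution; infer_instance

-- ===== CLAIM (what is proved, stated in full; the proofs are below) =====
def Claim_equal_solution : Prop := ∀ (absolutes : List Int) (signs : List Bool), Dom_solution absolutes signs → Pre_solution absolutes signs → Spec_solution absolutes signs (solution absolutes signs)

-- ===== LEMMAS AND PROOFS =====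

-- the signed-accumulator fold over pairs equals "sum of firsts minus twice the negatives"
theorem signed_fold_eq (l : List (Int × Bool)) (init : Int) :
    l.foldl (fun acc p => if p.2 == true then acc + p.1 else acc - p.1) init
      = init + (l.map Prod.fst).sum
          - 2 * ((l.filter (fun p => p.2 != true)).map Prod.fst).sum := by
  induction l generalizing init with
  | nil => simp
  | cons p l ih =>
    rw [List.foldl_cons, ih, List.filter_cons, List.map_cons, List.sum_cons]
    cases hb : p.2 <;> simp [hb] <;> ring

theorem solution_eq_zip_fold (absolutes : List Int) (signs : List Bool)
    (h : absolutes.length ≤ signs.length) :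
    solution absolutes signs
      = (absolutes.zip signs).foldl
          (fun acc p => if p.2 == true then acc + p.1 else acc - p.1) 0 := by
  unfold solution
  have hlen : ((absolutes.zip signs).length : Int) = (absolutes.length : Int) := by
    simp [List.length_zip, Nat.min_eq_left h]
  rw [← hlen]
  rw [PySem.List.foldl_congr_mem
        (g := fun acc idx =>
          (fun acc (p : Int × Bool) => if p.2 == true then acc + p.1 else acc - p.1)
            acc (PySem.List.pyGetD (absolutes.zip signs) idx (0, false)))]
  · exact PySem.List.foldl_pyRange_zero_pyGetD' (absolutes.zip signs) (0, false)
      (fun acc p => if p.2 == true then acc + p.1 else acc - p.1) 0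
  · intro acc idx hidx
    rw [PySem.List.mem_pyRange_one] at hidx
    obtain ⟨h0, hlt⟩ := hidx
    rw [hlen] at hlt
    have hltn : idx.toNat < absolutes.length := by omega
    have hlts : idx.toNat < signs.length := lt_of_lt_of_le hltn h
    have hltz : idx.toNat < (absolutes.zip signs).length := by
      rw [List.length_zip]; omega
    rw [PySem.List.pyGetD_eq_getElem (absolutes.zip signs) (0, false) h0 (by omega),
        PySem.List.pyGetD_eq_getElem signs false h0 (by omega),
        PySem.List.pyGetD_eq_getElem absolutes 0 h0 (by omega)]
    simp [List.getElem_zip]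


-- ===== VERDICT (by name: the statement is the Claim_ definition above) =====
theorem solution_spec : Claim_equal_solution := by
  intro absolutes signs _ hpre
  unfold Spec_solution solution_alt
  have h : absolutes.length ≤ signs.length := hpre
  rw [solution_eq_zip_fold absolutes signs h, signed_fold_eq, List.map_fst_zip h]
  simp only []
  ring
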